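-- pv_equiv track=rewrite | github.com/ranjan210/digital-encoder | main.py | returnNRZI
-- ===== SOURCE A (Python) =====
-- def appendToPoint(pointsX,pointsY,currX,currY):
--     pointsX.append(currX)
--     pointsY.append(currY)
--
-- def returnNRZI(inputStr):
--     pointsX = []
--     pointsY = []
--     currX = 0
--     currY = 1
--     for a in inputStr:
--         if a=="1":
--             currY=-currY
--         appendToPoint(pointsX,pointsY,currX,currY)
--
--         currX+=1
--         appendToPoint(pointsX,pointsY,currX,currY)
--
--     return pointsX,pointsY
-- ===== SOURCE B (Python) =====
-- def returnNRZI(inputStr):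
--     # pass 1: running parity of '1's gives one level per bit
--     ones = 0
--     levels = []
--     for c in inputStr:
--         if c == '1':
--             ones += 1
--         levels.append(1 - 2 * (ones % 2))
--     # pass 2: closed-form X staircase and each level duplicated
--     pointsX = [(k + 1) // 2 for k in range(2 * len(levels))]
--     pointsY = [y for y in levels for _ in range(2)]
--     return pointsX, pointsY
-- ===== Notes on version B (the rewrite author's own statement) =====
-- stated objective: alternative
-- what changed: Replaces the single interleaved toggle loop by two passes: levels computed from a running parity count of the toggle bits, then the X staircase built in closed form from a range and each level duplicated by a comprehension.
import Mathlib
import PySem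

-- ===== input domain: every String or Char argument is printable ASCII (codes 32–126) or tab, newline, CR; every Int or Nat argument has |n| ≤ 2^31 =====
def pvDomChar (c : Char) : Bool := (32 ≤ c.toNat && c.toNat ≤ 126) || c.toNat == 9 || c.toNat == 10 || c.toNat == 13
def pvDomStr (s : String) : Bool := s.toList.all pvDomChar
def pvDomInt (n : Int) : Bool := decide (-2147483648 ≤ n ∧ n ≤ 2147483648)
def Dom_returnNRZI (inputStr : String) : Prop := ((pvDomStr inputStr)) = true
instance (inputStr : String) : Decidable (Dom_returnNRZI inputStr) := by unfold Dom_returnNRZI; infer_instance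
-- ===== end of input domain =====

-- B replaces A's single interleaved toggle loop by a parity-count level pass plus a
-- closed-form X staircase and level duplication (objective: alternative, same cost).

-- ===== PORT A =====
-- one iteration of A's loop: toggle on '1', append currX/currY, increment, append again
def pvStepA (st : (List Int × List Int) × Int × Int) (a : Char) : (List Int × List Int) × Int × Int :=
  let y : Int := if a = '1' then -st.2.2 else st.2.2
  ((st.1.1 ++ [st.2.1] ++ [st.2.1 + 1], st.1.2 ++ [y] ++ [y]), st.2.1 + 1, y)

def returnNRZI (inputStr : String) : List Int × List Int :=
  (inputStr.toList.foldl pvStepA (([], []), 0, 1)).1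

-- ===== PORT B =====
-- pass 1 of Source B: running count of '1's, level = 1 - 2*(ones % 2)
def pvLevelsStep (p : Int × List Int) (c : Char) : Int × List Int :=
  let ones := if c = '1' then p.1 + 1 else p.1
  (ones, p.2 ++ [1 - 2 * PySem.Int.mod ones 2])

def returnNRZI_alt (inputStr : String) : List Int × List Int :=
  let levels := (inputStr.toList.foldl pvLevelsStep (0, [])).2
  let pointsX := (PySem.List.pyRange 0 (2 * (levels.length : Int)) 1).map
    (fun k => PySem.Int.floordiv (k + 1) 2)
  let pointsY := levels.flatMap (fun y => [y, y])
  (pointsX, pointsY)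

-- ===== PRECONDITION & SPEC =====
def Spec_returnNRZI (inputStr : String) (out : List Int × List Int) : Prop := out = returnNRZI_alt inputStr
instance (inputStr : String) (out : List Int × List Int) : Decidable (Spec_returnNRZI inputStr out) := by unfold Spec_returnNRZI; infer_instance

-- ===== CLAIM (what is proved, stated in full; the proofs are below) =====
def Claim_equal_returnNRZI : Prop := ∀ (inputStr : String), Dom_returnNRZI inputStr → Spec_returnNRZI inputStr (returnNRZI inputStr)

-- ===== LEMMAS AND PROOFS =====

-- reference shapes of the two output lists, by structural recursion on the characters
def pvRefX : List Char → Int → List Int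
  | [], _ => []
  | _ :: cs, x => x :: (x + 1) :: pvRefX cs (x + 1)

def pvRefY : List Char → Int → List Int
  | [], _ => []
  | c :: cs, y =>
    let y' := if c = '1' then -y else y
    y' :: y' :: pvRefY cs y'

def pvRefL : List Char → Int → List Int
  | [], _ => []
  | c :: cs, o =>
    let o' := if c = '1' then o + 1 else o
    (1 - 2 * PySem.Int.mod o' 2) :: pvRefL cs o'

theorem pvFoldA (cs : List Char) : ∀ (px py : List Int) (x y : Int),
    (cs.foldl pvStepA ((px, py), x, y)).1 = (px ++ pvRefX cs x, py ++ pvRefY cs y) := by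
  induction cs with
  | nil => simp [pvRefX, pvRefY]
  | cons c cs ih =>
    intro px py x y
    simp only [List.foldl_cons, pvStepA, pvRefX, pvRefY, ih]
    simp

theorem pvFoldL (cs : List Char) : ∀ (o : Int) (acc : List Int),
    (cs.foldl pvLevelsStep (o, acc)).2 = acc ++ pvRefL cs o := by
  induction cs with
  | nil => simp [pvRefL]
  | cons c cs ih =>
    intro o acc
    simp only [List.foldl_cons, pvLevelsStep, pvRefL, ih]
    simp

theorem pvRefL_length (cs : List Char) : ∀ o : Int, (pvRefL cs o).length = cs.length := by
  induction cs with
  | nil => simp [pvRefL]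
  | cons c cs ih => intro o; simp [pvRefL, ih]

theorem pvRefY_dup (cs : List Char) : ∀ o : Int, 0 ≤ o →
    pvRefY cs (1 - 2 * PySem.Int.mod o 2) = (pvRefL cs o).flatMap (fun y => [y, y]) := by
  induction cs with
  | nil => intro o _; simp [pvRefY, pvRefL]
  | cons c cs ih =>
    intro o ho
    by_cases h1 : c = '1'
    · have key : -(1 - 2 * PySem.Int.mod o 2) = 1 - 2 * PySem.Int.mod (o + 1) 2 := by
        rw [PySem.Int.mod_eq_emod_of_pos (by omega), PySem.Int.mod_eq_emod_of_pos (by omega)]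
        omega
      simp only [pvRefY, pvRefL, h1, if_true, key, List.flatMap_cons]
      rw [ih (o + 1) (by omega)]
      simp
    · simp only [pvRefY, pvRefL, if_neg h1, List.flatMap_cons]
      rw [ih o ho]
      simp

theorem pvRefX_range (cs : List Char) : ∀ x : Int,
    pvRefX cs x = (PySem.List.pyRange (2 * x) (2 * x + 2 * (cs.length : Int)) 1).map
      (fun k => PySem.Int.floordiv (k + 1) 2) := by
  induction cs with
  | nil => intro x; rw [pvRefX, show (2*x + 2*(([]:List Char).length:Int)) = 2*x by simp, PySem.List.pyRange_one_eq_nil le_rfl]; simp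
  | cons c cs ih =>
    intro x
    have hl : ((c :: cs).length : Int) = (cs.length : Int) + 1 := by push_cast [List.length_cons]; ring
    rw [pvRefX, hl]
    rw [PySem.List.pyRange_one_cons (by omega)]
    rw [PySem.List.pyRange_one_cons (by omega)]
    have e1 : PySem.Int.floordiv (2 * x + 1) 2 = x := by
      rw [PySem.Int.floordiv_eq_ediv_of_pos (by omega)]; omega
    have e2 : PySem.Int.floordiv (2 * x + 1 + 1) 2 = x + 1 := by
      rw [PySem.Int.floordiv_eq_ediv_of_pos (by omega)]; omega
    simp only [List.map_cons, e1, e2]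
    rw [ih (x + 1)]
    have hr : PySem.List.pyRange (2 * x + 1 + 1) (2 * x + 2 * ((cs.length : Int) + 1)) 1 =
        PySem.List.pyRange (2 * (x + 1)) (2 * (x + 1) + 2 * (cs.length : Int)) 1 := by
      rw [show (2 : Int) * x + 1 + 1 = 2 * (x + 1) from by ring,
          show (2 : Int) * x + 2 * ((cs.length : Int) + 1) = 2 * (x + 1) + 2 * (cs.length : Int) from by ring]
    rw [hr]

-- ===== VERDICT (by name: the statement is the Claim_ definition above) =====
theorem returnNRZI_spec : Claim_equal_returnNRZI := by
  intro s _
  unfold Spec_returnNRZI returnNRZI returnNRZI_alt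
  rw [pvFoldA, pvFoldL]
  simp only [List.nil_append]
  have hy : (1 : Int) = 1 - 2 * PySem.Int.mod 0 2 := by decide
  rw [hy, pvRefY_dup s.toList 0 (by omega), pvRefL_length]
  have := pvRefX_range s.toList 0
  simpa using this
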